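-- pv_equiv track=rewrite | github.com/14wual/pwned | writeup/htb/Socket/scripts/create-usernames.py | generate_usernames
-- ===== SOURCE A (Python) =====
-- import itertools
--
-- def generate_usernames(full_name):
--     full_name = full_name.lower()
--     names = full_name.split()
--     initials = [n[0] for n in names]
--     last_name = names[-1]
--
--     combinations = []
--     for r in range(1, len(initials) + 1):combinations.extend(list(itertools.combinations(initials, r)))
--
--     usernames = []
--
--     for combo in combinations:
--         username = "".join(combo) + last_name
--         usernames.append(username)
--
--     return usernames
-- ===== SOURCE B (Python) =====
-- def generate_usernames(full_name):
--     full_name = full_name.lower()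
--     names = full_name.split()
--     initials = [n[0] for n in names]
--     last_name = names[-1]
--
--     usernames = []
--     # breadth-first by subset size: each level holds (last chosen index, joined prefix)
--     level = [(i, initials[i]) for i in range(len(initials))]
--     while level:
--         usernames.extend(p + last_name for _, p in level)
--         level = [(j, p + initials[j]) for i, p in level for j in range(i + 1, len(initials))]
--     return usernames
-- ===== Notes on version B (the rewrite author's own statement) =====
-- stated objective: alternative
-- what changed: Replaces the itertools.combinations calls (one per subset size, each rebuilding tuples from scratch) with a breadth-first level iteration that extends each (last-index, joined-prefix) pair by every later initial, producing the same size-then-lexicographic order in one while loop.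
import Mathlib
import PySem

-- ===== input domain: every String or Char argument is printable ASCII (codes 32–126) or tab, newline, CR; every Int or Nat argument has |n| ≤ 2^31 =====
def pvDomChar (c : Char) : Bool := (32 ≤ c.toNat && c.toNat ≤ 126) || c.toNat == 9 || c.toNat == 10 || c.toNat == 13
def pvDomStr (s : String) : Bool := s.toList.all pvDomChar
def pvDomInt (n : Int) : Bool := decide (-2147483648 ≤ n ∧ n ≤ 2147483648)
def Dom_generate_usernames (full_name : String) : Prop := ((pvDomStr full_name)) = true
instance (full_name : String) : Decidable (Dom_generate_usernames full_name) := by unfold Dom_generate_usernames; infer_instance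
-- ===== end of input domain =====

-- B replaces the per-size itertools.combinations calls by one breadth-first level loop over
-- (last-index, joined-prefix) pairs; same output, same cost (alternative decomposition).

-- ===== PORT A =====
-- itertools.combinations(xs, r): subsets of size r in the documented order
-- (those containing the first element first, then the rest; lexicographic by position)
def pyCombinations {α : Type} : List α → Nat → List (List α)
  | _, 0 => [[]]
  | [], _+1 => []
  | x :: xs, r+1 => (pyCombinations xs r).map (fun c => x :: c) ++ pyCombinations xs (r+1)

def generate_usernames (full_name : String) : List String :=
  let full_name := PySem.Str.lower full_name
  let names := PySem.Str.split₀ full_name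
  -- n[0]: words produced by split() are nonempty, so the none (IndexError) branch is unreachable
  let initials := names.map (fun n =>
    match PySem.Str.pyGet? n 0 with
    | some c => String.singleton c
    | none => "")
  -- names[-1]: none (IndexError on an all-whitespace input) is excluded by Pre_
  let last_name := (PySem.List.pyGet? names (-1)).getD ""
  let combinations := (PySem.List.pyRange 1 ((initials.length : Int) + 1) 1).foldl
      (fun acc r => acc ++ pyCombinations initials r.toNat) []
  let usernames := combinations.foldl
      (fun acc combo => acc ++ [PySem.Str.join "" combo ++ last_name]) []
  usernames

-- ===== PORT B =====
-- one step of Source B's while loop: extend every (i, p) by each later initial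
def stepB (initials : List String) (level : List (Int × String)) : List (Int × String) :=
  level.flatMap (fun ip =>
    (PySem.List.pyRange (ip.1 + 1) (initials.length : Int) 1).map
      (fun j => (j, ip.2 ++ PySem.List.pyGetD initials j "")))

-- Source B's while loop; the fuel `initials.length` is only a termination guard: the level is
-- empty (and the loop stops in Python too) after at most that many iterations
def loopB (initials : List String) (last_name : String) : Nat → List (Int × String) → List String
  | 0, _ => []
  | fuel+1, level =>
    if level.isEmpty then []
    else level.foldl (fun acc ip => acc ++ [ip.2 ++ last_name]) [] ++
         loopB initials last_name fuel (stepB initials level)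

def generate_usernames_alt (full_name : String) : List String :=
  let full_name := PySem.Str.lower full_name
  let names := PySem.Str.split₀ full_name
  let initials := names.map (fun n =>
    match PySem.Str.pyGet? n 0 with
    | some c => String.singleton c
    | none => "")
  let last_name := (PySem.List.pyGet? names (-1)).getD ""
  let level := (PySem.List.pyRange 0 (initials.length : Int) 1).map
      (fun i => (i, PySem.List.pyGetD initials i ""))
  loopB initials last_name initials.length level

-- ===== PRECONDITION & SPEC =====
-- Pre_ excludes exactly the all-whitespace / empty inputs, on which Python's names[-1] raises IndexError.
def Pre_generate_usernames (full_name : String) : Prop :=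
  PySem.Str.split₀ (PySem.Str.lower full_name) ≠ []
instance (full_name : String) : Decidable (Pre_generate_usernames full_name) := by
  unfold Pre_generate_usernames; infer_instance

def pvWitness_generate_usernames : String := "John Smith"

def Spec_generate_usernames (full_name : String) (out : List String) : Prop := out = generate_usernames_alt full_name
instance (full_name : String) (out : List String) : Decidable (Spec_generate_usernames full_name out) := by unfold Spec_generate_usernames; infer_instance

-- ===== CLAIM (what is proved, stated in full; the proofs are below) =====
def Claim_equal_generate_usernames : Prop := ∀ (full_name : String), Dom_generate_usernames full_name → Pre_generate_usernames full_name → Spec_generate_usernames full_name (generate_usernames full_name)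

-- ===== LEMMAS AND PROOFS =====

-- each element of a list together with the strictly-later elements
def pvPicks {α : Type} : List α → List (α × List α)
  | [] => []
  | x :: xs => (x, xs) :: pvPicks xs

-- size-r combinations, each paired with the suffix strictly after its last chosen element
def pvCombosS {α : Type} : List α → Nat → List (List α × List α)
  | xs, 0 => [([], xs)]
  | [], _+1 => []
  | x :: xs, r+1 => (pvCombosS xs r).map (fun cs => (x :: cs.1, cs.2)) ++ pvCombosS xs (r+1)

lemma pvCombosS_fst {α : Type} : ∀ (xs : List α) (r : Nat),
    pyCombinations xs r = (pvCombosS xs r).map Prod.fst := by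
  intro xs
  induction xs with
  | nil => intro r; cases r <;> simp [pyCombinations, pvCombosS]
  | cons x xs ih =>
    intro r
    cases r with
    | zero => simp [pyCombinations, pvCombosS]
    | succ q =>
      simp [pyCombinations, pvCombosS, ih, Function.comp]

lemma pvCombosS_ext {α : Type} : ∀ (xs : List α) (r : Nat),
    pvCombosS xs (r+1)
      = (pvCombosS xs r).flatMap (fun cs =>
          (pvPicks cs.2).map (fun ys => (cs.1 ++ [ys.1], ys.2))) := by
  intro xs
  induction xs with
  | nil => intro r; cases r <;> simp [pvCombosS, pvPicks]
  | cons x xs ih =>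
    intro r
    cases r with
    | zero =>
      simp [pvCombosS, pvPicks, ih 0]
    | succ q =>
      simp only [pvCombosS, List.flatMap_append, List.flatMap_map, ih q, ih (q+1)]
      congr 1
      simp [List.map_flatMap, Function.comp_def]

lemma pvCombosS_suffix {α : Type} : ∀ (xs : List α) (r : Nat) (cs : List α × List α),
    cs ∈ pvCombosS xs r → cs.2 <:+ xs := by
  intro xs
  induction xs with
  | nil =>
    intro r cs h
    cases r with
    | zero => simp [pvCombosS] at h; simp [h]
    | succ q => simp [pvCombosS] at h
  | cons x xs ih =>
    intro r cs h
    cases r with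
    | zero => simp [pvCombosS] at h; simp [h]
    | succ q =>
      simp [pvCombosS] at h
      rcases h with ⟨a, b, hab, rfl⟩ | h
      · exact (ih q _ hab).trans (List.suffix_cons x xs)
      · exact (ih (q+1) cs h).trans (List.suffix_cons x xs)

lemma pvCombosS_eq_nil {α : Type} : ∀ (xs : List α) (r : Nat), xs.length < r →
    pvCombosS xs r = [] := by
  intro xs
  induction xs with
  | nil =>
    intro r h
    cases r with
    | zero => simp at h
    | succ q => simp [pvCombosS]
  | cons x xs ih =>
    intro r h
    cases r with
    | zero => omega
    | succ q =>
      simp at h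
      simp [pvCombosS, ih q (by omega), ih (q+1) (by omega)]

lemma pvCombosS_ne_nil {α : Type} : ∀ (xs : List α) (r : Nat), r ≤ xs.length →
    pvCombosS xs r ≠ [] := by
  intro xs
  induction xs with
  | nil =>
    intro r h
    cases r with
    | zero => simp [pvCombosS]
    | succ q => simp at h
  | cons x xs ih =>
    intro r h
    cases r with
    | zero => simp [pvCombosS]
    | succ q =>
      simp at h
      simp [pvCombosS]
      intro hmap
      exact absurd hmap (ih q h)

-- string facts, proved on the List Char side
lemma pvCharsJoinAppend : ∀ (l : List (List Char)) (p : List Char),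
    PySem.Chars.join [] (l ++ [p]) = PySem.Chars.join [] l ++ p := by
  intro l
  induction l with
  | nil => intro p; simp [PySem.Chars.join_nil, PySem.Chars.join_singleton]
  | cons a l ih =>
    intro p
    cases l with
    | nil => simp [PySem.Chars.join_cons_cons, PySem.Chars.join_singleton]
    | cons b l' =>
      rw [List.cons_append, List.cons_append, PySem.Chars.join_cons_cons,
          PySem.Chars.join_cons_cons, ← List.cons_append, ih p]
      simp

lemma pvJoinSingleton (y : String) : PySem.Str.join "" [y] = y := by
  simp [PySem.Str.join, PySem.Chars.join_singleton]

lemma pvJoinAppend (c : List String) (y : String) :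
    PySem.Str.join "" (c ++ [y]) = PySem.Str.join "" c ++ y := by
  simp [PySem.Str.join, pvCharsJoinAppend]

-- the B-loop state corresponding to a (combination, remaining-suffix) pair
def pvToSt (n : Nat) (cs : List String × List String) : Int × String :=
  ((n : Int) - cs.2.length - 1, PySem.Str.join "" cs.1)

-- the inner comprehension of Source B, described via pvPicks of the remaining suffix
lemma pvRangeMap (initials : List String) (p : String) :
    ∀ (m k : Nat), m = initials.length - k →
    (PySem.List.pyRange (k : Int) (initials.length : Int) 1).map
        (fun j => (j, p ++ PySem.List.pyGetD initials j ""))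
      = (pvPicks (initials.drop k)).map
          (fun ys => (((initials.length : Int) - ys.2.length - 1), p ++ ys.1)) := by
  intro m
  induction m with
  | zero =>
    intro k hk
    have h1 : initials.length ≤ k := by omega
    rw [List.drop_eq_nil_of_le h1, PySem.List.pyRange_one_eq_nil (by exact_mod_cast h1)]
    simp [pvPicks]
  | succ m ih =>
    intro k hk
    have hlt : k < initials.length := by omega
    rw [PySem.List.pyRange_one_cons (by exact_mod_cast hlt)]
    rw [List.drop_eq_getElem_cons hlt]
    simp only [List.map_cons, pvPicks]
    have h1 : ((k : Int) + 1) = ((k + 1 : Nat) : Int) := by push_cast; ring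
    rw [h1, ih (k+1) (by omega)]
    congr 1
    · rw [Prod.mk.injEq]
      refine ⟨?_, ?_⟩
      · have h2 : (initials.drop (k+1)).length = initials.length - (k+1) := by simp
        rw [h2]; omega
      · simp [PySem.List.pyGetD_natCast, List.getElem?_eq_getElem hlt]

lemma pvStep (initials : List String) (r : Nat) :
    stepB initials ((pvCombosS initials r).map (pvToSt initials.length))
      = (pvCombosS initials (r+1)).map (pvToSt initials.length) := by
  rw [pvCombosS_ext]
  unfold stepB
  rw [List.flatMap_map, List.map_flatMap]
  apply List.flatMap_congr
  intro cs hcs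
  obtain ⟨t, ht⟩ := pvCombosS_suffix initials r cs hcs
  have hlen : cs.2.length ≤ initials.length := by
    rw [← ht]; simp
  have hdrop : initials.drop (initials.length - cs.2.length) = cs.2 := by
    have h1 : t.length = initials.length - cs.2.length := by
      rw [← ht]; simp
    rw [← h1, ← ht, List.drop_left]
  have hidx : (pvToSt initials.length cs).1 + 1
      = ((initials.length - cs.2.length : Nat) : Int) := by
    simp only [pvToSt]; omega
  have h2 : (pvToSt initials.length cs).2 = PySem.Str.join "" cs.1 := rfl
  rw [hidx, h2, pvRangeMap initials (PySem.Str.join "" cs.1) cs.2.length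
        (initials.length - cs.2.length) (by omega), hdrop]
  simp only [List.map_map, Function.comp_def, pvToSt, pvJoinAppend]

lemma pvLoop (initials : List String) (last : String) :
    ∀ (fuel r : Nat), initials.length ≤ r + fuel →
    loopB initials last fuel ((pvCombosS initials (r+1)).map (pvToSt initials.length))
      = (PySem.List.pyRange ((r : Int)+1) ((initials.length : Int)+1) 1).flatMap
          (fun j => (pyCombinations initials j.toNat).map
            (fun c => PySem.Str.join "" c ++ last)) := by
  intro fuel
  induction fuel with
  | zero =>
    intro r h
    rw [pvCombosS_eq_nil initials (r+1) (by omega),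
        PySem.List.pyRange_one_eq_nil (by omega)]
    simp [loopB]
  | succ fuel ih =>
    intro r h
    by_cases hr : initials.length < r + 1
    · rw [pvCombosS_eq_nil initials (r+1) hr,
          PySem.List.pyRange_one_eq_nil (by omega)]
      simp [loopB]
    · have hr' : r + 1 ≤ initials.length := by omega
      have hne : pvCombosS initials (r+1) ≠ [] := pvCombosS_ne_nil initials (r+1) hr'
      rw [loopB, if_neg (by simp [List.isEmpty_iff, hne])]
      rw [PySem.List.foldl_append_singleton_eq_map, List.nil_append]
      rw [pvStep initials (r+1)]
      rw [PySem.List.pyRange_one_cons (by omega), List.flatMap_cons]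
      rw [ih (r+1) (by omega)]
      congr 1
      · have ht : ((r : Int) + 1).toNat = r + 1 := by omega
        rw [ht, pvCombosS_fst, List.map_map]
        simp [Function.comp_def, pvToSt]

lemma pvLevelInit (initials : List String) :
    (PySem.List.pyRange 0 (initials.length : Int) 1).map
        (fun i => (i, PySem.List.pyGetD initials i ""))
      = (pvCombosS initials 1).map (pvToSt initials.length) := by
  have h0 := pvRangeMap initials "" initials.length 0 (by omega)
  rw [pvCombosS_ext initials 0]
  simp only [pvCombosS, List.flatMap_cons, List.flatMap_nil, List.append_nil, List.map_map]
  calc (PySem.List.pyRange 0 (initials.length : Int) 1).map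
        (fun i => (i, PySem.List.pyGetD initials i ""))
      = (PySem.List.pyRange ((0:Nat) : Int) (initials.length : Int) 1).map
          (fun j => (j, "" ++ PySem.List.pyGetD initials j "")) := by simp
    _ = (pvPicks (initials.drop 0)).map
          (fun ys => (((initials.length : Int) - ys.2.length - 1), "" ++ ys.1)) := h0
    _ = (pvPicks initials).map
          ((pvToSt initials.length) ∘ (fun ys => ([ys.1], ys.2))) := by
        simp [Function.comp_def, pvToSt, pvJoinSingleton]

lemma pvMain (initials : List String) (last : String) :
    ((PySem.List.pyRange 1 ((initials.length : Int) + 1) 1).foldl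
        (fun acc r => acc ++ pyCombinations initials r.toNat) []).foldl
      (fun acc combo => acc ++ [PySem.Str.join "" combo ++ last]) []
    = loopB initials last initials.length
        ((PySem.List.pyRange 0 (initials.length : Int) 1).map
          (fun i => (i, PySem.List.pyGetD initials i ""))) := by
  rw [PySem.List.foldl_append_singleton_eq_map, List.nil_append,
      PySem.List.foldl_append_eq_flatMap, List.nil_append, List.map_flatMap]
  rw [pvLevelInit]
  have h := pvLoop initials last initials.length 0 (by omega)
  simpa using h.symm

-- ===== VERDICT (by name: the statement is the Claim_ definition above) =====
theorem generate_usernames_spec : Claim_equal_generate_usernames := by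
  intro full_name _ _
  show generate_usernames full_name = generate_usernames_alt full_name
  unfold generate_usernames generate_usernames_alt
  exact pvMain _ _
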